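-- pv_equiv track=rewrite | github.com/rodandr13/codewars-python | 7kyu/MinMinMax.py | min_min_max
-- ===== SOURCE A (Python) =====
-- def min_min_max(arr):
--     arr.sort()
--     min_num = min(arr)
--     max_num = max(arr)
--     result = None
--     min_num_index = arr.index(min_num)
--     counter = 1
--     for i in range(min_num_index, len(arr)):
--         if min_num + counter not in arr:
--             result = min_num + counter
--             break
--         counter += 1
--
--     return [min_num, result, max_num]
-- ===== SOURCE B (Python) =====
-- def min_min_max(arr):
--     # Note: like A, this sorts arr in place (observable side effect).
--     arr.sort()
--     low, high = arr[0], arr[-1]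
--     expected = low + 1
--     for x in arr[1:]:
--         if x > expected:
--             break
--         if x == expected:
--             expected += 1
--     return [low, expected, high]
-- ===== Notes on version B (the rewrite author's own statement) =====
-- stated objective: alternative
-- what changed: Instead of probing candidate values against the list with repeated 'in arr' membership scans, B makes one adjacent scan of the sorted list with an 'expected' accumulator (no membership tests at all) and reads min/max off the ends of the sorted list.
-- outside the precondition, e.g. on min_min_max([]): A raises ValueError, B raises IndexError
import Mathlib
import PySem

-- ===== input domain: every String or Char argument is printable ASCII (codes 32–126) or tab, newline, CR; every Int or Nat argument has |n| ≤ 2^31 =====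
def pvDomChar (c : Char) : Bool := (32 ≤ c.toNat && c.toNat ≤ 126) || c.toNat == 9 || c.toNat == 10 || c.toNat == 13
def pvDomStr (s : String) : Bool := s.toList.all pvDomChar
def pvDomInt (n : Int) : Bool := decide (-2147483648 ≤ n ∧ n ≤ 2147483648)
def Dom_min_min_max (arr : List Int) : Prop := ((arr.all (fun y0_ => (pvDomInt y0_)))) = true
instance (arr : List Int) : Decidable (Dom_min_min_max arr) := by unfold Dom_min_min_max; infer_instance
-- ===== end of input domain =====

-- B replaces A's repeated 'in arr' membership scans by ONE adjacent scan of the sorted list with an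
-- 'expected' accumulator (no membership structure at all); like A it sorts arr in place
-- (the equivalence proved here is about the return value).


-- ===== PORT A =====
-- A's for-loop with break: walks the range list with the counter as extra state
def pvALoop (arr2 : List Int) (min_num : Int) : List Int → Int → Option Int
  | [], _ => none
  | _ :: rest, counter =>
      if (min_num + counter) ∈ arr2 then pvALoop arr2 min_num rest (counter + 1)
      else some (min_num + counter)

def min_min_max (arr : List Int) : List (Option Int) :=
  let arr2 := PySem.List.sorted arr (fun x => x) false
  match PySem.List.min? arr2 (fun x => x), PySem.List.max? arr2 (fun x => x) with
  | some min_num, some max_num =>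
      -- arr.index(min_num): min_num ∈ arr2, so index? is some; the getD default is never used
      let min_num_index : Int := ((PySem.List.index? arr2 min_num).getD 0 : Nat)
      let result := pvALoop arr2 min_num (PySem.List.pyRange min_num_index (arr2.length : Int) 1) 1
      [some min_num, result, some max_num]
  | _, _ => []  -- Python raises ValueError on min([]); excluded by Pre_

-- ===== PORT B =====
-- B's for-loop over arr[1:] with break: 'expected' accumulator, bumped on match
def pvBLoop : List Int → Int → Int
  | [], e => e
  | x :: rest, e => if e < x then e else pvBLoop rest (if x = e then e + 1 else e)

def min_min_max_alt (arr : List Int) : List (Option Int) :=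
  let s := PySem.List.sorted arr (fun x => x) false
  match PySem.List.pyGet? s 0 with
  | none => []  -- Python raises IndexError on arr[0] of []; excluded by Pre_
  | some low =>
      match PySem.List.pyGet? s (-1) with
      | none => []
      | some high =>
          let expected := pvBLoop (PySem.List.slice s (some 1) none) (low + 1)
          [some low, some expected, some high]

-- ===== PRECONDITION & SPEC =====
-- Pre_ excludes only the empty list, on which A raises ValueError (min() of empty sequence).
def Pre_min_min_max (arr : List Int) : Prop := arr ≠ []
instance (arr : List Int) : Decidable (Pre_min_min_max arr) := by unfold Pre_min_min_max; infer_instance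
def pvWitness_min_min_max : List Int := [3, 1, 2, 2]

def Spec_min_min_max (arr : List Int) (out : List (Option Int)) : Prop := out = min_min_max_alt arr
instance (arr : List Int) (out : List (Option Int)) : Decidable (Spec_min_min_max arr out) := by unfold Spec_min_min_max; infer_instance

-- ===== CLAIM (what is proved, stated in full; the proofs are below) =====
def Claim_equal_min_min_max : Prop := ∀ (arr : List Int), Dom_min_min_max arr → Pre_min_min_max arr → Spec_min_min_max arr (min_min_max arr)

-- ===== LEMMAS AND PROOFS =====

-- B's scan of a sorted list returns the least k ≥ e absent from the list.
theorem pvBLoop_spec : ∀ (t : List Int) (e : Int), t.Pairwise (· ≤ ·) →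
    e ≤ pvBLoop t e ∧ pvBLoop t e ∉ t ∧ ∀ k, e ≤ k → k < pvBLoop t e → k ∈ t := by
  intro t
  induction t with
  | nil =>
      intro e _
      refine ⟨le_rfl, by simp, ?_⟩
      intro k h1 h2
      simp [pvBLoop] at h2
      omega
  | cons x rest ih =>
      intro e hp
      have hx : ∀ y ∈ rest, x ≤ y := (List.pairwise_cons.1 hp).1
      have hp' : rest.Pairwise (· ≤ ·) := (List.pairwise_cons.1 hp).2
      by_cases h1 : e < x
      · have hr : pvBLoop (x :: rest) e = e := by simp [pvBLoop, h1]
        refine ⟨le_of_eq hr.symm, ?_, ?_⟩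
        · rw [hr]
          intro hmem
          rcases List.mem_cons.1 hmem with h | h
          · omega
          · have := hx e h; omega
        · intro k hk1 hk2; rw [hr] at hk2; omega
      · by_cases h2 : x = e
        · subst h2
          have hr : pvBLoop (x :: rest) x = pvBLoop rest (x + 1) := by
            simp [pvBLoop]
          obtain ⟨ih1, ih2, ih3⟩ := ih (x + 1) hp'
          rw [hr]
          refine ⟨by omega, ?_, ?_⟩
          · intro hmem
            rcases List.mem_cons.1 hmem with h | h
            · omega
            · exact ih2 h
          · intro k hk1 hk2
            by_cases hke : k = x
            · simp [hke]
            · exact List.mem_cons_of_mem _ (ih3 k (by omega) hk2)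
        · have hxe : x < e := by omega
          have hr : pvBLoop (x :: rest) e = pvBLoop rest e := by
            simp [pvBLoop, h1, h2]
          obtain ⟨ih1, ih2, ih3⟩ := ih e hp'
          rw [hr]
          refine ⟨ih1, ?_, ?_⟩
          · intro hmem
            rcases List.mem_cons.1 hmem with h | h
            · omega
            · exact ih2 h
          · intro k hk1 hk2
            exact List.mem_cons_of_mem _ (ih3 k hk1 hk2)

-- Pigeonhole: if every integer in [m, r) is an element of s, then r - m ≤ |s|.
theorem pvPigeon (s : List Int) (m r : Int) (hr : m ≤ r)
    (hall : ∀ k, m ≤ k → k < r → k ∈ s) : r - m ≤ (s.length : Int) := by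
  have hsub : Finset.Icc m (r - 1) ⊆ s.toFinset := by
    intro k hk
    rw [Finset.mem_Icc] at hk
    exact List.mem_toFinset.2 (hall k hk.1 (by omega))
  have h1 := Finset.card_le_card hsub
  rw [Int.card_Icc] at h1
  have h2 : s.toFinset.card ≤ s.length := List.toFinset_card_le s
  omega

-- A's loop finds r = the first candidate ≥ m + c absent from s, if the walked list is long enough.
theorem pvALoop_eq (s : List Int) (m r : Int) (hrno : r ∉ s) :
    ∀ (l : List Int) (c : Int), m + c ≤ r → (∀ k, m + c ≤ k → k < r → k ∈ s) →
      r < m + c + l.length → pvALoop s m l c = some r := by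
  intro l
  induction l with
  | nil => intro c hc _ hlen; simp at hlen; omega
  | cons _ rest ih =>
      intro c hc hall hlen
      show (if (m + c) ∈ s then pvALoop s m rest (c + 1) else some (m + c)) = some r
      by_cases he : m + c = r
      · rw [he, if_neg hrno]
      · have hin : (m + c) ∈ s := hall _ le_rfl (by omega)
        rw [if_pos hin]
        refine ih (c + 1) (by omega) (fun k hk1 hk2 => hall k (by omega) hk2) ?_
        simp [List.length_cons] at hlen ⊢
        omega

theorem pvFoldlMin (m : Int) (t : List Int) (h : ∀ y ∈ t, m ≤ y) : t.foldl min m = m := by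
  rcases PySem.List.foldl_min_mem t m with he | hm
  · exact he
  · exact le_antisymm ((PySem.List.foldl_min_le t m).1) (h _ hm)

theorem pvFoldlMaxLast : ∀ (t : List Int) (m : Int), (m :: t).Pairwise (· ≤ ·) →
    t.foldl max m = (m :: t).getLast (List.cons_ne_nil m t) := by
  intro t
  induction t with
  | nil => intro m _; rfl
  | cons b t' ih =>
      intro m hp
      have hmb : m ≤ b := (List.pairwise_cons.1 hp).1 b (by simp)
      have hp' : (b :: t').Pairwise (· ≤ ·) := (List.pairwise_cons.1 hp).2
      show t'.foldl max (max m b) = _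
      rw [max_eq_right hmb, List.getLast_cons (List.cons_ne_nil b t')]
      exact ih b hp'

theorem pvMain (arr : List Int) (hpre : arr ≠ []) : min_min_max arr = min_min_max_alt arr := by
  unfold min_min_max min_min_max_alt
  have hne : PySem.List.sorted arr (fun x => x) false ≠ [] := by
    rw [Ne, PySem.List.sorted_eq_nil_iff]; exact hpre
  obtain ⟨m, t, hs⟩ : ∃ m t, PySem.List.sorted arr (fun x => x) false = m :: t := by
    cases h : PySem.List.sorted arr (fun x => x) false with
    | nil => exact absurd h hne
    | cons a b => exact ⟨a, b, rfl⟩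
  have hpair : (m :: t).Pairwise (· ≤ ·) := by
    have := PySem.List.sorted_pairwise arr (fun x => x)
    rwa [hs] at this
  have hmle : ∀ y ∈ t, m ≤ y := (List.pairwise_cons.1 hpair).1
  have hp' : t.Pairwise (· ≤ ·) := (List.pairwise_cons.1 hpair).2
  have hfmin : t.foldl min m = m := pvFoldlMin m t hmle
  have hfmax := pvFoldlMaxLast t m hpair
  simp only [hs]
  rw [PySem.List.min?_id_cons, PySem.List.max?_id_cons, hfmin, hfmax]
  have hget0 : PySem.List.pyGet? (m :: t) (0 : Int) = some m := by
    simp [PySem.List.pyGet?, PySem.List.pyIdx?]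
  have hgetneg : PySem.List.pyGet? (m :: t) (-1 : Int) = some ((m :: t).getLast (List.cons_ne_nil m t)) := by
    simp [pysem, List.getLast_eq_getElem]
    rfl
  rw [hget0, hgetneg, PySem.List.slice_from_one]
  simp only [PySem.List.index?_cons_self, Option.getD_some, Nat.cast_zero, List.tail_cons]
  -- both middles equal r := pvBLoop t (m+1)
  obtain ⟨hb1, hb2, hb3⟩ := pvBLoop_spec t (m + 1) hp'
  set r := pvBLoop t (m + 1) with hrdef
  have hrno : r ∉ (m :: t) := by
    intro hmem
    rcases List.mem_cons.1 hmem with h | h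
    · omega
    · exact hb2 h
  have hallS : ∀ k, m ≤ k → k < r → k ∈ (m :: t) := by
    intro k hk1 hk2
    by_cases hkm : k = m
    · simp [hkm]
    · exact List.mem_cons_of_mem _ (hb3 k (by omega) hk2)
  have hpig : r - m ≤ ((m :: t).length : Int) :=
    pvPigeon (m :: t) m r (by omega) hallS
  have hA : pvALoop (m :: t) m (PySem.List.pyRange 0 ((m :: t).length : Int) 1) 1 = some r := by
    refine pvALoop_eq (m :: t) m r hrno _ 1 (by omega)
      (fun k hk1 hk2 => List.mem_cons_of_mem _ (hb3 k hk1 hk2)) ?_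
    rw [PySem.List.length_pyRange_one]
    omega
  rw [hA]

-- ===== VERDICT (by name: the statement is the Claim_ definition above) =====
theorem min_min_max_spec : Claim_equal_min_min_max := by
  intro arr _ hpre
  exact pvMain arr hpre
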